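-- pv_equiv track=rewrite | github.com/BITSniper2002/Privacy-Acquisition-Algorithm-in-Federated-Learning | experiment/sports.py | recombine_proper_nouns
-- ===== SOURCE A (Python) =====
-- def recombine_proper_nouns(words, proper_nouns):
--     """将被拆分的专有名词重新组合成原词."""
--     combined_proper_nouns = []
--     i = 0
--     while i < len(words):
--         j = i
--         while j < len(words):
--             word = " ".join(words[i:j+1])
--             if word in proper_nouns:
--                 combined_proper_nouns.append(word)
--                 i = j + 1
--                 break
--             j += 1
--         if j == len(words):
--             i += 1
--     return combined_proper_nouns
-- ===== SOURCE B (Python) =====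
-- def recombine_proper_nouns(words, proper_nouns):
--     """Greedy recombination via a set lookup and a length-bounded incremental join:
--     extending a candidate always grows its character length, so once it exceeds the
--     longest proper noun no further extension can match and the scan stops."""
--     pns = set(proper_nouns)
--     maxlen = max(map(len, proper_nouns), default=-1)
--     n = len(words)
--
--     def match_at(i):
--         # shortest j >= i with " ".join(words[i:j+1]) a proper noun, with that word
--         word = words[i]
--         j = i
--         while len(word) <= maxlen:
--             if word in pns:
--                 return j, word
--             j += 1
--             if j == n:
--                 return None
--             word = word + " " + words[j]
--         return None
--
--     res = []
--     i = 0
--     while i < n: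
--         m = match_at(i)
--         if m is None:
--             i += 1
--         else:
--             j, word = m
--             res.append(word)
--             i = j + 1
--     return res
-- ===== Notes on version B (the rewrite author's own statement) =====
-- stated objective: faster
-- what changed: B replaces A's unbounded inner rescan (which re-joins words[i:j+1] from scratch at every j) with a set lookup plus an incremental, length-bounded extension that stops as soon as the candidate is longer than the longest proper noun.
import Mathlib
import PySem

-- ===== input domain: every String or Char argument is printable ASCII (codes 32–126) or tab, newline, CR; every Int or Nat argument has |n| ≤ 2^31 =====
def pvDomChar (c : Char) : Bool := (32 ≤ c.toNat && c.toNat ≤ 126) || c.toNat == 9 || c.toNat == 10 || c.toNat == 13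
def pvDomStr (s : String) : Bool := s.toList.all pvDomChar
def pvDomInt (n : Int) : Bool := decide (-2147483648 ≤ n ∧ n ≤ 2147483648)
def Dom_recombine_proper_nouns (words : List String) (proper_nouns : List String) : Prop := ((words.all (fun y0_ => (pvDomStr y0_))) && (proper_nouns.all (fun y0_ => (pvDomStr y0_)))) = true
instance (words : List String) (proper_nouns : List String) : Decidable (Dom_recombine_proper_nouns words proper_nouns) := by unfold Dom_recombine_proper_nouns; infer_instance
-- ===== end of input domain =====

-- B replaces A's unbounded inner rescan (a fresh " ".join(words[i:j+1]) and list scan at every j)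
-- by a set lookup plus an incremental join that stops once the candidate exceeds the longest
-- proper noun's character length (objective: faster).
-- Both while loops are ported with a structural fuel of words.length + 1, which bounds their
-- iteration count (each step increases the index by at least 1), so the ports are total.

-- ===== PORT A =====
-- word = " ".join(words[i:j+1])
def pvJoinA (words : List String) (i j : Nat) : String :=
  PySem.Str.join " " (PySem.List.slice words (some (i : Int)) (some ((j : Int) + 1)))

-- A's inner while loop: first j ≥ i (j < len words) with " ".join(words[i:j+1]) in proper_nouns
def pvInnerA (words proper_nouns : List String) (i : Nat) : Nat → Nat → Option Nat
  | 0, _ => none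
  | fuel + 1, j =>
    if j < words.length then
      if pvJoinA words i j ∈ proper_nouns then some j
      else pvInnerA words proper_nouns i fuel (j + 1)
    else none

-- A's outer while loop (the appended word is recomputed at the break index, as in A)
def pvOuterA (words proper_nouns : List String) : Nat → Nat → List String
  | 0, _ => []
  | fuel + 1, i =>
    if i < words.length then
      match pvInnerA words proper_nouns i (words.length + 1) i with
      | some j => pvJoinA words i j :: pvOuterA words proper_nouns fuel (j + 1)
      | none => pvOuterA words proper_nouns fuel (i + 1)
    else []

def recombine_proper_nouns (words : List String) (proper_nouns : List String) : List String :=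
  pvOuterA words proper_nouns (words.length + 1) 0

-- ===== PORT B =====
-- Python '+' on strings
def pvCat (a b : String) : String := String.ofList (a.toList ++ b.toList)

-- maxlen = max(map(len, proper_nouns), default=-1)
def pvMaxLen (proper_nouns : List String) : Int :=
  proper_nouns.foldl (fun m p => max m (PySem.Str.len p)) (-1)

-- B's match_at inner loop: incremental join, stopping once len(word) > maxlen
def pvMatchAt (words : List String) (pns : PySem.Set String) (maxlen : Int) :
    Nat → Nat → String → Option (Nat × String)
  | 0, _, _ => none
  | fuel + 1, j, word =>
    if PySem.Str.len word ≤ maxlen then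
      if PySem.Set.contains pns word then some (j, word)
      else if j + 1 < words.length then
        pvMatchAt words pns maxlen fuel (j + 1) (pvCat (pvCat word " ") (words.getD (j + 1) ""))
      else none
    else none

-- B's outer while loop
def pvLoopB (words : List String) (pns : PySem.Set String) (maxlen : Int) :
    Nat → Nat → List String
  | 0, _ => []
  | fuel + 1, i =>
    if i < words.length then
      match pvMatchAt words pns maxlen (words.length + 1) i (words.getD i "") with
      | some (j, w) => w :: pvLoopB words pns maxlen fuel (j + 1)
      | none => pvLoopB words pns maxlen fuel (i + 1)
    else []

def recombine_proper_nouns_alt (words : List String) (proper_nouns : List String) : List String :=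
  pvLoopB words (PySem.Set.ofList proper_nouns) (pvMaxLen proper_nouns) (words.length + 1) 0

-- ===== PRECONDITION & SPEC =====
def Spec_recombine_proper_nouns (words : List String) (proper_nouns : List String) (out : List String) : Prop := out = recombine_proper_nouns_alt words proper_nouns
instance (words : List String) (proper_nouns : List String) (out : List String) : Decidable (Spec_recombine_proper_nouns words proper_nouns out) := by unfold Spec_recombine_proper_nouns; infer_instance

-- ===== CLAIM (what is proved, stated in full; the proofs are below) =====
def Claim_equal_recombine_proper_nouns : Prop := ∀ (words : List String) (proper_nouns : List String), Dom_recombine_proper_nouns words proper_nouns → Spec_recombine_proper_nouns words proper_nouns (recombine_proper_nouns words proper_nouns)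

-- ===== LEMMAS AND PROOFS =====

-- join over a snoc with a nonempty front
lemma join_append_singleton (sep z : List Char) :
    ∀ (ys : List (List Char)), ys ≠ [] →
      PySem.Chars.join sep (ys ++ [z]) = PySem.Chars.join sep ys ++ sep ++ z := by
  intro ys
  induction ys with
  | nil => intro h; exact absurd rfl h
  | cons y t ih =>
    intro _
    cases t with
    | nil =>
      simp only [List.nil_append, List.cons_append]
      rw [PySem.Chars.join_cons_cons, PySem.Chars.join_singleton, PySem.Chars.join_singleton]
    | cons y2 t2 =>
      have ih' := ih (by simp)
      simp only [List.cons_append] at ih'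
      simp only [List.cons_append]
      rw [PySem.Chars.join_cons_cons, PySem.Chars.join_cons_cons, ih']
      simp [List.append_assoc]

lemma joinA_eq (words : List String) (i j : Nat) :
    pvJoinA words i j = PySem.Str.join " " ((words.drop i).take (j + 1 - i)) := by
  unfold pvJoinA
  rw [show ((j : Int) + 1) = ((j + 1 : Nat) : Int) by push_cast; ring,
    PySem.List.slice_natCast]

lemma joinA_single (words : List String) (i : Nat) (h : i < words.length) :
    pvJoinA words i i = words.getD i "" := by
  rw [joinA_eq, show i + 1 - i = 1 by omega, List.drop_eq_getElem_cons h,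
    List.getD_eq_getElem words "" h]
  apply String.toList_inj.mp
  rw [PySem.Str.toList_join,
    show List.map String.toList (List.take 1 (words[i] :: List.drop (i + 1) words))
      = [words[i].toList] from rfl]
  exact PySem.Chars.join_singleton ..

lemma joinA_ext (words : List String) (i j : Nat) (hij : i ≤ j) (hj : j + 1 < words.length) :
    pvJoinA words i (j + 1) = pvCat (pvCat (pvJoinA words i j) " ") (words.getD (j + 1) "") := by
  rw [joinA_eq, joinA_eq]
  have h1 : j + 1 + 1 - i = (j + 1 - i) + 1 := by omega
  have h3 : (words.drop i)[j + 1 - i]? = some (words.getD (j + 1) "") := by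
    rw [List.getElem?_drop, List.getD_eq_getElem words "" hj]
    rw [show i + (j + 1 - i) = j + 1 by omega]
    exact List.getElem?_eq_getElem hj
  rw [h1, List.take_add_one, h3]
  apply String.toList_inj.mp
  have hne : ((words.drop i).take (j + 1 - i)).map String.toList ≠ [] := by
    have hlen : 0 < ((words.drop i).take (j + 1 - i)).length := by
      rw [List.length_take, List.length_drop]; omega
    intro hc
    rw [← List.length_eq_zero_iff, List.length_map] at hc
    omega
  simp only [pvCat, PySem.Str.toList_join, List.map_append, String.toList_ofList]
  rw [show List.map String.toList (some (words.getD (j + 1) "")).toList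
      = [(words.getD (j + 1) "").toList] from rfl]
  exact join_append_singleton _ _ _ hne

lemma len_eq_toList (s : String) : PySem.Str.len s = (s.toList.length : Int) := by simp

lemma cat_toList (a b : String) : (pvCat a b).toList = a.toList ++ b.toList := by
  simp [pvCat]

lemma joinA_len_ext (words : List String) (i j : Nat) (hij : i ≤ j) (hj : j + 1 < words.length) :
    PySem.Str.len (pvJoinA words i j) + 1 ≤ PySem.Str.len (pvJoinA words i (j + 1)) := by
  rw [joinA_ext words i j hij hj, len_eq_toList, len_eq_toList, cat_toList, cat_toList]
  simp only [List.length_append]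
  have : " ".toList.length = 1 := by decide
  omega

-- every proper noun's length is bounded by pvMaxLen
lemma foldl_max_le_init (l : List String) :
    ∀ (init : Int), init ≤ l.foldl (fun m p => max m (PySem.Str.len p)) init := by
  induction l with
  | nil => intro init; simp
  | cons p t ih =>
    intro init
    simp only [List.foldl_cons]
    exact le_trans (le_max_left _ _) (ih _)

lemma len_le_maxLen (proper_nouns : List String) (p : String) (hp : p ∈ proper_nouns) :
    PySem.Str.len p ≤ pvMaxLen proper_nouns := by
  unfold pvMaxLen
  generalize (-1 : Int) = init
  induction proper_nouns generalizing init with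
  | nil => exact absurd hp (by simp)
  | cons q t ih =>
    simp only [List.foldl_cons]
    rcases List.mem_cons.mp hp with h | h
    · subst h
      exact le_trans (le_max_right _ _) (foldl_max_le_init t _)
    · exact ih h _

-- A's inner loop returns none once the candidate word is longer than every proper noun
lemma innerA_none_of_long (words proper_nouns : List String) (i : Nat) :
    ∀ (fuel j : Nat), i ≤ j →
      (j < words.length → pvMaxLen proper_nouns < PySem.Str.len (pvJoinA words i j)) →
      pvInnerA words proper_nouns i fuel j = none := by
  intro fuel
  induction fuel with
  | zero => intro j _ _; rfl
  | succ fuel ih =>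
    intro j hij hlong
    rw [pvInnerA]
    by_cases hj : j < words.length
    · rw [if_pos hj]
      have hnm : pvJoinA words i j ∉ proper_nouns := by
        intro hmem
        have := len_le_maxLen proper_nouns _ hmem
        have := hlong hj
        omega
      rw [if_neg hnm]
      apply ih (j + 1) (by omega)
      intro hj1
      have := joinA_len_ext words i j hij hj1
      have := hlong hj
      omega
    · rw [if_neg hj]

-- A's inner loop returns none past the end of words, for any fuel
lemma innerA_none_past_end (words proper_nouns : List String) (i : Nat) :
    ∀ (fuel j : Nat), ¬ j < words.length → pvInnerA words proper_nouns i fuel j = none := by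
  intro fuel j hj
  cases fuel with
  | zero => rfl
  | succ fuel => rw [pvInnerA, if_neg hj]

-- the two inner loops agree (run with the same fuel), and B's returned word is A's join
-- at the match index, which is ≥ the start index
lemma inner_eq (words proper_nouns : List String) (i : Nat) :
    ∀ (fuel j : Nat), words.length + 1 - j ≤ fuel → i ≤ j → j < words.length →
      pvInnerA words proper_nouns i fuel j =
        (pvMatchAt words (PySem.Set.ofList proper_nouns) (pvMaxLen proper_nouns) fuel j
          (pvJoinA words i j)).map Prod.fst ∧
      ∀ (k : Nat) (w : String),
        pvMatchAt words (PySem.Set.ofList proper_nouns) (pvMaxLen proper_nouns) fuel j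
          (pvJoinA words i j) = some (k, w) → w = pvJoinA words i k ∧ j ≤ k := by
  intro fuel
  induction fuel with
  | zero => intro j hfuel _ hj; omega
  | succ fuel ih =>
    intro j hfuel hij hj
    rw [pvMatchAt]
    by_cases h1 : PySem.Str.len (pvJoinA words i j) ≤ pvMaxLen proper_nouns
    · rw [if_pos h1]
      have hcon : PySem.Set.contains (PySem.Set.ofList proper_nouns) (pvJoinA words i j) =
          decide (pvJoinA words i j ∈ proper_nouns) := by
        simp [PySem.Set.contains, PySem.Set.mem_ofList]
      by_cases hmem : pvJoinA words i j ∈ proper_nouns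
      · rw [hcon, decide_eq_true hmem, if_pos rfl]
        constructor
        · rw [pvInnerA, if_pos hj, if_pos hmem]
          rfl
        · intro k w hw
          cases hw
          exact ⟨rfl, le_rfl⟩
      · rw [hcon, decide_eq_false hmem]
        rw [if_neg (show ¬(false = true) by simp)]
        by_cases h3 : j + 1 < words.length
        · rw [if_pos h3]
          rw [← joinA_ext words i j hij h3]
          have hih := ih (j + 1) (by omega) (by omega) h3
          constructor
          · rw [pvInnerA, if_pos hj, if_neg hmem]
            exact hih.1
          · intro k w hw
            have := hih.2 k w hw
            exact ⟨this.1, by omega⟩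
        · rw [if_neg h3]
          constructor
          · rw [pvInnerA, if_pos hj, if_neg hmem,
              innerA_none_past_end words proper_nouns i fuel (j + 1) h3]
            rfl
          · intro k w hw; exact absurd hw (by simp)
    · rw [if_neg h1]
      constructor
      · rw [innerA_none_of_long words proper_nouns i (fuel + 1) j hij (fun _ => by omega)]
        rfl
      · intro k w hw; exact absurd hw (by simp)

-- the two outer loops agree (run with the same fuel)
lemma outer_eq (words proper_nouns : List String) :
    ∀ (fuel i : Nat),
      pvOuterA words proper_nouns fuel i =
        pvLoopB words (PySem.Set.ofList proper_nouns) (pvMaxLen proper_nouns) fuel i := by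
  intro fuel
  induction fuel with
  | zero => intro i; rfl
  | succ fuel ih =>
    intro i
    rw [pvOuterA, pvLoopB]
    by_cases hi : i < words.length
    · rw [if_pos hi, if_pos hi]
      have hg : words.getD i "" = pvJoinA words i i := (joinA_single words i hi).symm
      have hmain := inner_eq words proper_nouns i (words.length + 1) i (by omega) le_rfl hi
      rw [hg]
      rcases hB : pvMatchAt words (PySem.Set.ofList proper_nouns) (pvMaxLen proper_nouns)
          (words.length + 1) i (pvJoinA words i i) with _ | ⟨k, w⟩
      · have hA : pvInnerA words proper_nouns i (words.length + 1) i = none := by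
          rw [hmain.1, hB]; rfl
        rw [hA]
        exact ih (i + 1)
      · have hA : pvInnerA words proper_nouns i (words.length + 1) i = some k := by
          rw [hmain.1, hB]; rfl
        have hw := hmain.2 k w hB
        rw [hA, hw.1]
        exact congrArg _ (ih (k + 1))
    · rw [if_neg hi, if_neg hi]

-- ===== VERDICT (by name: the statement is the Claim_ definition above) =====
theorem recombine_proper_nouns_spec : Claim_equal_recombine_proper_nouns := by
  intro words proper_nouns _
  unfold Spec_recombine_proper_nouns recombine_proper_nouns recombine_proper_nouns_alt
  exact outer_eq words proper_nouns (words.length + 1) 0
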